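-- pv_equiv track=rewrite | github.com/jh85/JHBR2 | shogi_model_v2.py | move_to_direction
-- ===== SOURCE A (Python) =====
-- DIRECTION_VECTORS = [
--     (0, -1),   # 0: UP
--     (-1, -1),  # 1: UP_LEFT
--     (1, -1),   # 2: UP_RIGHT
--     (-1, 0),   # 3: LEFT
--     (1, 0),    # 4: RIGHT
--     (0, 1),    # 5: DOWN
--     (-1, 1),   # 6: DOWN_LEFT
--     (1, 1),    # 7: DOWN_RIGHT
--     (-1, -2),  # 8: UP2_LEFT (knight)
--     (1, -2),   # 9: UP2_RIGHT (knight)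
-- ]
--
-- SLIDING_DIRS = {0, 1, 2, 3, 4, 5, 6, 7}
--
-- def move_to_direction(from_sq, to_sq):
--     """Convert (from, to) to direction index. Returns -1 if not a valid direction."""
--     from_f, from_r = from_sq // 9, from_sq % 9
--     to_f, to_r = to_sq // 9, to_sq % 9
--     df = to_f - from_f
--     dr = to_r - from_r
--
--     for idx, (vf, vr) in enumerate(DIRECTION_VECTORS):
--         if idx in SLIDING_DIRS:
--             # Check if (df, dr) is a positive multiple of (vf, vr)
--             if vf == 0 and vr == 0:
--                 continue
--             if vf == 0:
--                 if df == 0 and dr != 0 and (dr > 0) == (vr > 0) and dr % vr == 0: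
--                     return idx
--             elif vr == 0:
--                 if dr == 0 and df != 0 and (df > 0) == (vf > 0) and df % vf == 0:
--                     return idx
--             else:
--                 if df != 0 and dr != 0 and df % vf == 0 and dr % vr == 0:
--                     dist_f = df // vf
--                     dist_r = dr // vr
--                     if dist_f == dist_r and dist_f > 0:
--                         return idx
--         else:
--             # Step: exact match
--             if df == vf and dr == vr:
--                 return idx
--     return -1
-- ===== SOURCE B (Python) =====
-- def move_to_direction(from_sq, to_sq):
--     """Convert (from, to) to direction index. Returns -1 if not a valid direction."""
--     df = to_sq // 9 - from_sq // 9
--     dr = to_sq % 9 - from_sq % 9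
--     if dr == -2 and (df == -1 or df == 1):
--         return 8 if df == -1 else 9
--     if df == 0:
--         return -1 if dr == 0 else (0 if dr < 0 else 5)
--     if dr == 0:
--         return 3 if df < 0 else 4
--     if df == dr:
--         return 1 if df < 0 else 7
--     if df == -dr:
--         return 2 if df > 0 else 6
--     return -1
-- ===== Notes on version B (the rewrite author's own statement) =====
-- stated objective: simpler
-- what changed: Replaces the loop over DIRECTION_VECTORS testing positive-multiple divisibility with a direct closed-form sign/equality classification of (df, dr): knight offsets checked exactly, then axis and diagonal cases by sign comparisons.
import Mathlib
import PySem

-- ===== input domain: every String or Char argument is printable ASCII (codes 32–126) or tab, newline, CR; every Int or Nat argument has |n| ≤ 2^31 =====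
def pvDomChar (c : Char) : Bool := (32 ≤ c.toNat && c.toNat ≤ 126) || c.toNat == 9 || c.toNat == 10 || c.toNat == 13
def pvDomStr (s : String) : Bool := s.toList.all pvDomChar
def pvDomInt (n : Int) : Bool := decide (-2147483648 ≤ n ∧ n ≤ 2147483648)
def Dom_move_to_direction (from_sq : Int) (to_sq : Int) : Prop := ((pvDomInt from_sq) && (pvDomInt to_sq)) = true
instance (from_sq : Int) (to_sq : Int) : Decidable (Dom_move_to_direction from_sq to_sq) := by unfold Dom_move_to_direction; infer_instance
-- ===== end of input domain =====

-- B replaces A's loop over direction vectors (divisibility/multiple tests) with a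
-- closed-form sign/equality classification of (df, dr); objective: simpler.

-- ===== PORT A =====
def pvDirectionVectors : List (Int × Int) :=
  [(0, -1), (-1, -1), (1, -1), (-1, 0), (1, 0), (0, 1), (-1, 1), (1, 1), (-1, -2), (1, -2)]

def pvSlidingDirs : PySem.Set Int := PySem.Set.ofList [0, 1, 2, 3, 4, 5, 6, 7]

-- the for-loop with early return, step for step
def pvLoopA (df dr : Int) : List (Int × (Int × Int)) → Int
  | [] => -1
  | (idx, (vf, vr)) :: rest =>
    if (pvSlidingDirs.contains idx) then
      if vf == 0 && vr == 0 then pvLoopA df dr rest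
      else if vf == 0 then
        if df == 0 && dr != 0 && ((decide (dr > 0)) == (decide (vr > 0))) && PySem.Int.mod dr vr == 0
        then idx else pvLoopA df dr rest
      else if vr == 0 then
        if dr == 0 && df != 0 && ((decide (df > 0)) == (decide (vf > 0))) && PySem.Int.mod df vf == 0
        then idx else pvLoopA df dr rest
      else
        if df != 0 && dr != 0 && PySem.Int.mod df vf == 0 && PySem.Int.mod dr vr == 0 then
          let dist_f := PySem.Int.floordiv df vf
          let dist_r := PySem.Int.floordiv dr vr
          if dist_f == dist_r && dist_f > 0 then idx else pvLoopA df dr rest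
        else pvLoopA df dr rest
    else
      if df == vf && dr == vr then idx else pvLoopA df dr rest

def move_to_direction (from_sq : Int) (to_sq : Int) : Int :=
  let from_f := PySem.Int.floordiv from_sq 9
  let from_r := PySem.Int.mod from_sq 9
  let to_f := PySem.Int.floordiv to_sq 9
  let to_r := PySem.Int.mod to_sq 9
  let df := to_f - from_f
  let dr := to_r - from_r
  pvLoopA df dr (PySem.List.enumerate pvDirectionVectors)

-- ===== PORT B =====
def move_to_direction_alt (from_sq : Int) (to_sq : Int) : Int :=
  let df := PySem.Int.floordiv to_sq 9 - PySem.Int.floordiv from_sq 9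
  let dr := PySem.Int.mod to_sq 9 - PySem.Int.mod from_sq 9
  if dr = -2 ∧ (df = -1 ∨ df = 1) then (if df = -1 then 8 else 9)
  else if df = 0 then (if dr = 0 then -1 else if dr < 0 then 0 else 5)
  else if dr = 0 then (if df < 0 then 3 else 4)
  else if df = dr then (if df < 0 then 1 else 7)
  else if df = -dr then (if df > 0 then 2 else 6)
  else -1

-- ===== PRECONDITION & SPEC =====
def Spec_move_to_direction (from_sq : Int) (to_sq : Int) (out : Int) : Prop := out = move_to_direction_alt from_sq to_sq
instance (from_sq : Int) (to_sq : Int) (out : Int) : Decidable (Spec_move_to_direction from_sq to_sq out) := by unfold Spec_move_to_direction; infer_instance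

-- ===== CLAIM (what is proved, stated in full; the proofs are below) =====
def Claim_equal_move_to_direction : Prop := ∀ (from_sq : Int) (to_sq : Int), Dom_move_to_direction from_sq to_sq → Spec_move_to_direction from_sq to_sq (move_to_direction from_sq to_sq)

-- ===== LEMMAS AND PROOFS =====

theorem m0 : ((0:Int) ∈ pvSlidingDirs) := by decide
theorem m1 : ((1:Int) ∈ pvSlidingDirs) := by decide
theorem m2 : ((2:Int) ∈ pvSlidingDirs) := by decide
theorem m3 : ((3:Int) ∈ pvSlidingDirs) := by decide
theorem m4 : ((4:Int) ∈ pvSlidingDirs) := by decide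
theorem m5 : ((5:Int) ∈ pvSlidingDirs) := by decide
theorem m6 : ((6:Int) ∈ pvSlidingDirs) := by decide
theorem m7 : ((7:Int) ∈ pvSlidingDirs) := by decide
theorem m8 : ¬ ((8:Int) ∈ pvSlidingDirs) := by decide
theorem m9 : ¬ ((9:Int) ∈ pvSlidingDirs) := by decide
theorem fd_neg_one (x : Int) : PySem.Int.floordiv x (-1) = -x := by
  simp [PySem.Int.floordiv]
  rw [show (-1 : Int) = -(1:Int) from rfl, Int.fdiv_neg, Int.fdiv_one] <;> simp
theorem md_neg_one (x : Int) : PySem.Int.mod x (-1) = 0 := by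
  have := fd_neg_one x
  simp [PySem.Int.floordiv] at this
  simp [PySem.Int.mod, Int.fmod_def, this]


-- core: for ALL integer offsets (df, dr) the closed-form classification equals A's loop
theorem pvLoop_eq_classify (df dr : Int) :
    pvLoopA df dr (PySem.List.enumerate pvDirectionVectors) =
    (if dr = -2 ∧ (df = -1 ∨ df = 1) then (if df = -1 then 8 else 9)
     else if df = 0 then (if dr = 0 then -1 else if dr < 0 then 0 else 5)
     else if dr = 0 then (if df < 0 then 3 else 4)
     else if df = dr then (if df < 0 then 1 else 7)
     else if df = -dr then (if df > 0 then 2 else 6)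
     else -1) := by
  have he : PySem.List.enumerate pvDirectionVectors =
    [(0,(0,-1)),(1,(-1,-1)),(2,(1,-1)),(3,(-1,0)),(4,(1,0)),(5,(0,1)),(6,(-1,1)),(7,(1,1)),(8,(-1,-2)),(9,(1,-2))] := by decide
  rw [he]
  by_cases hk : dr = -2 ∧ (df = -1 ∨ df = 1)
  · obtain ⟨hdr, hdf⟩ := hk
    subst hdr
    rcases hdf with h | h <;> subst h <;> decide
  · rw [if_neg hk]
    by_cases h0 : df = 0
    · subst h0
      by_cases hr : dr = 0
      · subst hr; decide
      · rcases lt_or_gt_of_ne hr with hlt | hgt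
        · simp [pvLoopA, m0, md_neg_one, hr, hlt, not_lt.mpr (le_of_lt hlt)]
        · simp [pvLoopA, m0, m1, m2, m3, m4, m5, md_neg_one, hr, hgt, not_lt.mpr (le_of_lt hgt)]
    · rw [if_neg h0]
      by_cases hr0 : dr = 0
      · subst hr0
        rcases lt_or_gt_of_ne h0 with hlt | hgt
        · simp [pvLoopA, m0, m1, m2, m3, md_neg_one, h0, hlt, not_lt.mpr (le_of_lt hlt)]
        · simp [pvLoopA, m0, m1, m2, m3, m4, md_neg_one, h0, hgt, not_lt.mpr (le_of_lt hgt)]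
      · rw [if_neg hr0]
        by_cases hd : df = dr
        · subst hd
          rcases lt_or_gt_of_ne h0 with hlt | hgt
          · simp [pvLoopA, m0, m1, fd_neg_one, md_neg_one, h0, hlt,
              not_lt.mpr (le_of_lt hlt)]
          · simp [pvLoopA, m0, m1, m2, m3, m4, m5, m6, m7, fd_neg_one, md_neg_one, h0, hgt,
              not_lt.mpr (le_of_lt hgt)]
            omega
        · rw [if_neg hd]
          by_cases ha : df = -dr
          · subst ha
            rcases lt_or_gt_of_ne hr0 with hlt | hgt
            · simp [pvLoopA, m0, m1, m2, fd_neg_one, md_neg_one, hr0, hlt]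
              omega
            · simp [pvLoopA, m0, m1, m2, m3, m4, m5, m6, fd_neg_one, md_neg_one, hr0, hgt]
              omega
          · rw [if_neg ha]
            simp [pvLoopA, m0, m1, m2, m3, m4, m5, m6, m7, m8, m9, fd_neg_one, md_neg_one, h0, hr0, hd, ha]
            omega

-- ===== VERDICT (by name: the statement is the Claim_ definition above) =====
theorem move_to_direction_spec : Claim_equal_move_to_direction := by
  intro from_sq to_sq _
  unfold Spec_move_to_direction move_to_direction move_to_direction_alt
  exact pvLoop_eq_classify _ _
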